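-- pv_equiv track=rewrite | github.com/alepershin/builder_Configurator | main.py | will_fit
-- ===== SOURCE A (Python) =====
-- def will_fit(vertices, length, width):
--     # Вычисление координат ограничивающего прямоугольника
--     x_coordinates = [vertex['x'] for vertex in vertices]
--     y_coordinates = y_coordinates = [vertex.get('y', 0) for vertex in vertices]
--
--     min_x = min(x_coordinates)
--     max_x = max(x_coordinates)
--     min_y = min(y_coordinates)
--     max_y = max(y_coordinates)
--
--     # Вычисление ширины и длины ограничивающего прямоугольника
--     bounding_box_length = max_x - min_x
--     bounding_box_width = max_y - min_y
--
--     # Сравнение размеров ограничивающего прямоугольника с заданными размерами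
--     if (bounding_box_length <= length and bounding_box_width <= width) or (bounding_box_length <= width and bounding_box_width <= length):
--         return True
--     else:
--         return False
-- ===== SOURCE B (Python) =====
-- def will_fit(vertices, length, width):
--     # Sort each coordinate list: span = last - first.  Then canonicalise
--     # orientation: compare sorted spans against sorted target dimensions
--     # componentwise, which is equivalent to A's two-orientation disjunction.
--     xs = sorted(v['x'] for v in vertices)
--     ys = sorted(v.get('y', 0) for v in vertices)
--     spans = sorted([xs[-1] - xs[0], ys[-1] - ys[0]])
--     dims = sorted([length, width])
--     return spans[0] <= dims[0] and spans[1] <= dims[1]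
-- ===== Notes on version B (the rewrite author's own statement) =====
-- stated objective: alternative
-- what changed: B sorts each coordinate list and reads the span as last-minus-first, then canonicalises orientation by comparing the sorted pair of spans with the sorted pair of target dimensions componentwise, replacing A's four min/max scans and two-orientation disjunction.
import Mathlib
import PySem

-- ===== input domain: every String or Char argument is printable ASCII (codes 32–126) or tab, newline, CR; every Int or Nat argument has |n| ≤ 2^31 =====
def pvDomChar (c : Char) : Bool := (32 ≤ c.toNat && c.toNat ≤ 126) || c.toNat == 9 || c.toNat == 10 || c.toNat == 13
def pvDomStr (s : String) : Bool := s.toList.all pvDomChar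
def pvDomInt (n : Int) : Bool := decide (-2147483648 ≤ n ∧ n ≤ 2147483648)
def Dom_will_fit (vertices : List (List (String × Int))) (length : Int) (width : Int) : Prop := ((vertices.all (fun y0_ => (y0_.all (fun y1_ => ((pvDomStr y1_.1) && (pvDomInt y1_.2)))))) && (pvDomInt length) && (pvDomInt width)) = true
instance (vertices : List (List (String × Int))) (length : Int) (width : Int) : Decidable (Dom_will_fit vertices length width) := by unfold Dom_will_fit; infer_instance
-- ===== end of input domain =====

-- B sorts each coordinate list (span = last - first) and compares the sorted pair of
-- spans with the sorted pair of dimensions componentwise, instead of A's four min/max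
-- scans and two-orientation disjunction (alternative algorithm, same result).


-- ===== PORT A =====
-- vertex['x'] : first-match lookup; the .getD 0 is only reached outside Pre_ (KeyError in Python)
def pvGetX (v : List (String × Int)) : Int := ((PySem.Dict.mk v).get? "x").getD 0
-- vertex.get('y', 0)
def pvGetY (v : List (String × Int)) : Int := (PySem.Dict.mk v).getD "y" 0

def will_fit (vertices : List (List (String × Int))) (length : Int) (width : Int) : Bool :=
  let x_coordinates := vertices.map pvGetX
  let y_coordinates := vertices.map pvGetY
  -- min()/max(); the .getD 0 is only reached on empty vertices (ValueError in Python, outside Pre_)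
  let min_x := (PySem.List.min? x_coordinates (fun x => x)).getD 0
  let max_x := (PySem.List.max? x_coordinates (fun x => x)).getD 0
  let min_y := (PySem.List.min? y_coordinates (fun x => x)).getD 0
  let max_y := (PySem.List.max? y_coordinates (fun x => x)).getD 0
  let bounding_box_length := max_x - min_x
  let bounding_box_width := max_y - min_y
  if (bounding_box_length ≤ length ∧ bounding_box_width ≤ width) ∨
     (bounding_box_length ≤ width ∧ bounding_box_width ≤ length) then true else false

-- ===== PORT B =====
-- xs[-1]/xs[0] : the .getD 0 is only reached on empty vertices (IndexError in Python, outside Pre_)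
def will_fit_alt (vertices : List (List (String × Int))) (length : Int) (width : Int) : Bool :=
  let xs := PySem.List.sorted (vertices.map pvGetX) (fun x => x) false
  let ys := PySem.List.sorted (vertices.map pvGetY) (fun x => x) false
  let spanx := (PySem.List.pyGet? xs (-1)).getD 0 - (PySem.List.pyGet? xs 0).getD 0
  let spany := (PySem.List.pyGet? ys (-1)).getD 0 - (PySem.List.pyGet? ys 0).getD 0
  let spans := PySem.List.sorted [spanx, spany] (fun x => x) false
  let dims := PySem.List.sorted [length, width] (fun x => x) false
  decide ((PySem.List.pyGet? spans 0).getD 0 ≤ (PySem.List.pyGet? dims 0).getD 0) &&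
  decide ((PySem.List.pyGet? spans 1).getD 0 ≤ (PySem.List.pyGet? dims 1).getD 0)

-- ===== PRECONDITION & SPEC =====
-- Pre_ excludes exactly the inputs where Python A raises: ValueError on empty vertices,
-- KeyError on a vertex without key 'x'.
def Pre_will_fit (vertices : List (List (String × Int))) (length : Int) (width : Int) : Prop :=
  vertices ≠ [] ∧ ∀ v ∈ vertices, (v.any (fun p => p.1 == "x")) = true
instance (vertices : List (List (String × Int))) (length : Int) (width : Int) : Decidable (Pre_will_fit vertices length width) := by unfold Pre_will_fit; infer_instance

def pvWitness_will_fit : (List (List (String × Int))) × Int × Int :=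
  ([[("x", 0), ("y", 1)], [("x", 3)]], 3, 2)

def Spec_will_fit (vertices : List (List (String × Int))) (length : Int) (width : Int) (out : Bool) : Prop := out = will_fit_alt vertices length width
instance (vertices : List (List (String × Int))) (length : Int) (width : Int) (out : Bool) : Decidable (Spec_will_fit vertices length width out) := by unfold Spec_will_fit; infer_instance

-- ===== CLAIM =====
def Claim_equal_will_fit : Prop := ∀ (vertices : List (List (String × Int))) (length : Int) (width : Int), Dom_will_fit vertices length width → Pre_will_fit vertices length width → Spec_will_fit vertices length width (will_fit vertices length width)

-- ===== LEMMAS AND PROOFS =====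

-- first element of sorted(x :: t) is the running min, last is the running max
theorem sorted_first (x : Int) (t : List Int) :
    PySem.List.pyGet? (PySem.List.sorted (x :: t) (fun y => y) false) 0 = some (t.foldl min x) := by
  have hperm := PySem.List.sorted_perm (x :: t) (fun y : Int => y) false
  have hlen : (PySem.List.sorted (x :: t) (fun y : Int => y) false).length = t.length + 1 := by
    rw [hperm.length_eq, List.length_cons]
  have h0 : 0 < (PySem.List.sorted (x :: t) (fun y : Int => y) false).length := by omega
  have hget : PySem.List.pyGet? (PySem.List.sorted (x :: t) (fun y : Int => y) false) 0
      = some (PySem.List.sorted (x :: t) (fun y : Int => y) false)[0] := by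
    simp [PySem.List.pyGet?, PySem.List.pyIdx?]
  rw [hget]
  have hMmem : (t.foldl min x) ∈ PySem.List.sorted (x :: t) (fun y : Int => y) false :=
    hperm.mem_iff.mpr (PySem.List.min?_mem (PySem.List.min?_id_cons x t))
  obtain ⟨j, hj, hsj⟩ := List.mem_iff_getElem.mp hMmem
  have h1 : (PySem.List.sorted (x :: t) (fun y : Int => y) false)[0] ≤ t.foldl min x := by
    rw [← hsj]; exact PySem.List.sorted_id_getElem_mono (x :: t) (Nat.zero_le j) hj
  have h2 : t.foldl min x ≤ (PySem.List.sorted (x :: t) (fun y : Int => y) false)[0] :=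
    PySem.List.min?_isMin (PySem.List.min?_id_cons x t) _
      (hperm.mem_iff.mp (List.getElem_mem h0))
  exact congrArg some (le_antisymm h1 h2)

theorem sorted_last (x : Int) (t : List Int) :
    PySem.List.pyGet? (PySem.List.sorted (x :: t) (fun y => y) false) (-1) = some (t.foldl max x) := by
  have hperm := PySem.List.sorted_perm (x :: t) (fun y : Int => y) false
  have hlen : (PySem.List.sorted (x :: t) (fun y : Int => y) false).length = t.length + 1 := by
    rw [hperm.length_eq, List.length_cons]
  have hlt : t.length < (PySem.List.sorted (x :: t) (fun y : Int => y) false).length := by omega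
  have hget : PySem.List.pyGet? (PySem.List.sorted (x :: t) (fun y : Int => y) false) (-1)
      = some (PySem.List.sorted (x :: t) (fun y : Int => y) false)[t.length] := by
    simp [PySem.List.pyGet?, PySem.List.pyIdx?, hlen]
  rw [hget]
  have hMmem : (t.foldl max x) ∈ PySem.List.sorted (x :: t) (fun y : Int => y) false :=
    hperm.mem_iff.mpr (PySem.List.max?_mem (PySem.List.max?_id_cons x t))
  obtain ⟨j, hj, hsj⟩ := List.mem_iff_getElem.mp hMmem
  have h1 : t.foldl max x ≤ (PySem.List.sorted (x :: t) (fun y : Int => y) false)[t.length] := by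
    rw [← hsj]
    exact PySem.List.sorted_id_getElem_mono (x :: t) (by omega : j ≤ t.length) hlt
  have h2 : (PySem.List.sorted (x :: t) (fun y : Int => y) false)[t.length] ≤ t.foldl max x :=
    PySem.List.max?_isMax (PySem.List.max?_id_cons x t) _
      (hperm.mem_iff.mp (List.getElem_mem hlt))
  exact congrArg some (le_antisymm h2 h1)

theorem sorted_pair (a b : Int) :
    PySem.List.sorted [a, b] (fun y => y) false = [min a b, max a b] := by
  rcases le_total a b with h | h
  · have := PySem.List.sorted_id_eq_of_perm_of_pairwise (xs := [a, b]) (ys := [a, b])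
      (List.Perm.refl _) (by simp [h])
    rw [this]; simp [min_eq_left h, max_eq_right h]
  · have := PySem.List.sorted_id_eq_of_perm_of_pairwise (xs := [a, b]) (ys := [b, a])
      (List.Perm.swap a b []) (by simp [h])
    rw [this]; simp [min_eq_right h, max_eq_left h]

-- ===== VERDICT =====
theorem will_fit_spec : Claim_equal_will_fit := by
  intro vertices length width _ hpre
  obtain ⟨hne, _⟩ := hpre
  unfold Spec_will_fit will_fit will_fit_alt
  match vertices, hne with
  | first :: rest, _ =>
    simp only [List.map_cons, PySem.List.min?_id_cons, PySem.List.max?_id_cons,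
      Option.getD_some, sorted_first, sorted_last, sorted_pair]
    set L := (rest.map pvGetX).foldl max (pvGetX first) - (rest.map pvGetX).foldl min (pvGetX first) with hL
    set W := (rest.map pvGetY).foldl max (pvGetY first) - (rest.map pvGetY).foldl min (pvGetY first) with hW
    simp only [PySem.List.pyGet?, PySem.List.pyIdx?, List.length_cons, List.length_nil]
    norm_num
    by_cases h1 : L ≤ length <;> by_cases h2 : W ≤ width <;>
      by_cases h3 : L ≤ width <;> by_cases h4 : W ≤ length <;> simp [h1, h2, h3, h4] <;> omega
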